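-- pv_equiv track=rewrite | github.com/rsprenkels/kattis | python/2_2/thedealoftheday.py | the_deal_of_the_day
-- ===== SOURCE A (Python) =====
-- import functools
-- import itertools
-- import operator
-- from typing import Sequence
--
-- def the_deal_of_the_day(deck: Sequence[int], hand_size: int) -> int:
--     candidates = [c for c in deck if c > 0]
--     combinations = itertools.combinations(candidates, hand_size)
--     total_strict_ascending = 0
--     for comb in combinations:
--         prod = functools.reduce(operator.mul, comb)
--         total_strict_ascending += prod
--     return total_strict_ascending
-- ===== SOURCE B (Python) =====
-- def the_deal_of_the_day(deck, hand_size):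
--     # dynamic program for the elementary symmetric polynomial e_k of the positive cards
--     pos = [c for c in deck if c > 0]
--     if hand_size > len(pos):
--         return 0
--     e = [1] + [0] * hand_size
--     for c in pos:
--         e = [1] + [cur + prev * c for prev, cur in zip(e, e[1:])]
--     return e[hand_size]
-- ===== Notes on version B (the rewrite author's own statement) =====
-- stated objective: alternative
-- what changed: Replaces enumeration of all C(n,k) combinations (one product per combination) with the standard O(n*k) dynamic program for the elementary symmetric polynomial e_k of the positive cards.
import Mathlib
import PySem

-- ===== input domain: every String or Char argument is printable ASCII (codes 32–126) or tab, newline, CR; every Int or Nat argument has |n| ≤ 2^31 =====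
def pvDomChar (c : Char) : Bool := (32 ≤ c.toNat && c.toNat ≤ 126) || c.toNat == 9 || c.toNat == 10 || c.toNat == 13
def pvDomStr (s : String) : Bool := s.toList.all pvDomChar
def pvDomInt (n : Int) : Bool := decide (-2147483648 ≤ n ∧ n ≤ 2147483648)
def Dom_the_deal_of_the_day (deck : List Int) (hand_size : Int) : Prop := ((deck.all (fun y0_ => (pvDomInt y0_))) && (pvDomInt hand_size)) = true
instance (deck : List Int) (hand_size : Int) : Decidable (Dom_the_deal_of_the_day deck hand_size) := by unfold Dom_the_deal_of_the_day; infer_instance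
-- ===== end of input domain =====

-- B computes the sum as the elementary symmetric polynomial e_k of the positive cards by dynamic programming instead of enumerating all combinations (objective: alternative algorithm).

-- ===== PORT A =====
-- itertools.combinations(xs, k), in itertools' order
def pvCombos : List Int → Nat → List (List Int)
  | _, 0 => [[]]
  | [], _ + 1 => []
  | x :: rest, k + 1 => ((pvCombos rest k).map (fun c => x :: c)) ++ pvCombos rest (k + 1)

-- functools.reduce(operator.mul, comb); the [] case is Python's TypeError, excluded by Pre_
def pvReduceMul : List Int → Int
  | [] => 0
  | a :: rest => rest.foldl (· * ·) a

def the_deal_of_the_day (deck : List Int) (hand_size : Int) : Int :=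
  let candidates := deck.filter (fun c => decide (c > 0))
  (pvCombos candidates hand_size.toNat).foldl (fun acc comb => acc + pvReduceMul comb) 0

-- ===== PORT B =====
-- the comprehension [cur + prev * c for prev, cur in zip(ps, cs)], transcribed
-- tail-recursively (accumulator built front-to-back, as Python builds the list)
def pvZipTerms (c : Int) : List Int → List Int → List Int → List Int
  | prev :: ps, cur :: cs, acc => pvZipTerms c ps cs ((cur + prev * c) :: acc)
  | _, _, acc => acc.reverse

-- e = [1] + [cur + prev * c for prev, cur in zip(e, e[1:])]
def pvStep (e : List Int) (c : Int) : List Int :=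
  1 :: pvZipTerms c e e.tail []

def the_deal_of_the_day_alt (deck : List Int) (hand_size : Int) : Int :=
  let pos := deck.filter (fun c => decide (c > 0))
  if hand_size > (pos.length : Int) then 0
  else
    let e0 : List Int := 1 :: List.replicate hand_size.toNat 0   -- [1] + [0]*hand_size
    let e := pos.foldl pvStep e0
    (PySem.List.pyGet? e hand_size).getD 0   -- e[hand_size]; in range whenever Pre_ holds

-- ===== PRECONDITION & SPEC =====
-- Pre_ excludes hand_size ≤ 0, on which A raises (TypeError from reduce on the empty
-- tuple for hand_size = 0, ValueError from itertools.combinations for negative hand_size).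
def Pre_the_deal_of_the_day (_deck : List Int) (hand_size : Int) : Prop := 1 ≤ hand_size
instance (deck : List Int) (hand_size : Int) : Decidable (Pre_the_deal_of_the_day deck hand_size) := by unfold Pre_the_deal_of_the_day; infer_instance
def pvWitness_the_deal_of_the_day : List Int × Int := ([3, -1, 2, 5], 2)

def Spec_the_deal_of_the_day (deck : List Int) (hand_size : Int) (out : Int) : Prop := out = the_deal_of_the_day_alt deck hand_size
instance (deck : List Int) (hand_size : Int) (out : Int) : Decidable (Spec_the_deal_of_the_day deck hand_size out) := by unfold Spec_the_deal_of_the_day; infer_instance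

-- ===== CLAIM (what is proved, stated in full; the proofs are below) =====
def Claim_equal_the_deal_of_the_day : Prop := ∀ (deck : List Int) (hand_size : Int), Dom_the_deal_of_the_day deck hand_size → Pre_the_deal_of_the_day deck hand_size → Spec_the_deal_of_the_day deck hand_size (the_deal_of_the_day deck hand_size)

-- ===== LEMMAS AND PROOFS =====

-- elementary symmetric polynomial e_k
def pvEsym : List Int → Nat → Int
  | _, 0 => 1
  | [], _ + 1 => 0
  | x :: xs, k + 1 => pvEsym xs (k + 1) + x * pvEsym xs k

theorem pvZipTerms_eq (c : Int) (ps cs acc : List Int) :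
    pvZipTerms c ps cs acc = acc.reverse ++ (ps.zip cs).map (fun p => p.2 + p.1 * c) := by
  induction ps generalizing cs acc with
  | nil => simp [pvZipTerms]
  | cons p ps ih =>
    cases cs with
    | nil => simp [pvZipTerms]
    | cons q cs => simp [pvZipTerms, ih]

theorem pvStep_eq (e : List Int) (c : Int) :
    pvStep e c = 1 :: (e.zip e.tail).map (fun p => p.2 + p.1 * c) := by
  simp [pvStep, pvZipTerms_eq]

theorem pvEsym_zero (l : List Int) : pvEsym l 0 = 1 := by cases l <;> simp [pvEsym]

theorem foldl_mul_eq (l : List Int) (a : Int) : l.foldl (· * ·) a = a * l.prod := by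
  induction l generalizing a with
  | nil => simp
  | cons x xs ih => simp [List.foldl_cons, ih]; ring

theorem combos_prod_sum (xs : List Int) (k : Nat) :
    ((pvCombos xs k).map List.prod).sum = pvEsym xs k := by
  induction xs generalizing k with
  | nil => cases k <;> simp [pvCombos, pvEsym]
  | cons x xs ih =>
    cases k with
    | zero => simp [pvCombos, pvEsym_zero]
    | succ k =>
      simp only [pvCombos, pvEsym, List.map_append, List.sum_append, List.map_map]
      rw [ih]
      have : ((pvCombos xs k).map (List.prod ∘ fun c => x :: c)) =
          (pvCombos xs k).map (fun c => x * c.prod) := by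
        simp [Function.comp]
      rw [this, PySem.List.sum_map_const_mul_int, ih]
      ring

theorem combos_reduce_sum (xs : List Int) (k : Nat) :
    ((pvCombos xs (k + 1)).map pvReduceMul).sum = pvEsym xs (k + 1) := by
  induction xs generalizing k with
  | nil => simp [pvCombos, pvEsym]
  | cons x xs ih =>
    simp only [pvCombos, pvEsym, List.map_append, List.sum_append, List.map_map]
    rw [ih]
    have : ((pvCombos xs k).map (pvReduceMul ∘ fun c => x :: c)) =
        (pvCombos xs k).map (fun c => x * c.prod) := by
      simp [Function.comp, pvReduceMul, foldl_mul_eq]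
    rw [this, PySem.List.sum_map_const_mul_int, combos_prod_sum xs k]
    ring

theorem foldl_sum_reduce (l : List (List Int)) (a : Int) :
    l.foldl (fun acc comb => acc + pvReduceMul comb) a = a + (l.map pvReduceMul).sum := by
  induction l generalizing a with
  | nil => simp
  | cons x xs ih => simp [List.foldl_cons, ih]; ring

theorem pvEsym_append (xs : List Int) (x : Int) (k : Nat) :
    pvEsym (xs ++ [x]) (k + 1) = pvEsym xs (k + 1) + pvEsym xs k * x := by
  induction xs generalizing k with
  | nil => cases k <;> simp [pvEsym, mul_comm]
  | cons y xs ih =>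
    cases k with
    | zero => simp [pvEsym, ih, pvEsym_zero]; ring
    | succ k => simp only [List.cons_append, pvEsym, ih]; ring

theorem pvStep_map_esym (xs : List Int) (x : Int) (K : Nat) :
    pvStep ((List.range (K + 1)).map (pvEsym xs)) x
      = (List.range (K + 1)).map (pvEsym (xs ++ [x])) := by
  apply List.ext_getElem
  · simp [pvStep_eq, List.range_succ_eq_map, List.length_zip]
  · intro i h1 h2
    match i with
    | 0 => simp [pvStep_eq, pvEsym_zero]
    | j + 1 =>
      have hlen : (((List.range (K + 1)).map (pvEsym xs)).zip
          ((List.range (K + 1)).map (pvEsym xs)).tail).length = K := by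
        simp [List.range_succ_eq_map, List.length_zip]
      have hj : j < K := by
        simp at h2; omega
      have hj1 : j < (((List.range (K + 1)).map (pvEsym xs))).length := by simp; omega
      have hj2 : j < (((List.range (K + 1)).map (pvEsym xs))).tail.length := by simp; omega
      have hz : j < (((List.range (K + 1)).map (pvEsym xs)).zip
          ((List.range (K + 1)).map (pvEsym xs)).tail).length := by omega
      simp only [pvStep_eq, List.getElem_cons_succ, List.getElem_map,
        List.getElem_zip, List.getElem_tail]
      simp only [List.getElem_range]
      rw [pvEsym_append]

theorem foldl_step_esym (xs : List Int) (K : Nat) :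
    xs.foldl pvStep (1 :: List.replicate K 0) = (List.range (K + 1)).map (pvEsym xs) := by
  induction xs using List.reverseRecOn with
  | nil =>
    apply List.ext_getElem
    · simp
    · intro i h1 h2
      match i with
      | 0 => simp [pvEsym_zero]
      | j + 1 =>
        have : j < K := by simp at h1; omega
        simp [List.getElem_replicate, pvEsym]
  | append_singleton xs x ih =>
    rw [List.foldl_append, ih, List.foldl_cons, List.foldl_nil, pvStep_map_esym]

theorem pvEsym_eq_zero (xs : List Int) (k : Nat) (h : xs.length < k) : pvEsym xs k = 0 := by
  induction xs generalizing k with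
  | nil => cases k with | zero => omega | succ k => simp [pvEsym]
  | cons x xs ih =>
    cases k with
    | zero => omega
    | succ k =>
      simp only [List.length_cons] at h
      simp [pvEsym, ih (k + 1) (by omega), ih k (by omega)]

-- ===== VERDICT (by name: the statement is the Claim_ definition above) =====
theorem the_deal_of_the_day_spec : Claim_equal_the_deal_of_the_day := by
  intro deck hand_size _ hpre
  have hpre' : 1 ≤ hand_size := hpre
  obtain ⟨k, rfl⟩ : ∃ k : Nat, hand_size = (k : Int) + 1 := ⟨(hand_size - 1).toNat, by omega⟩
  have ht : ((k : Int) + 1).toNat = k + 1 := by omega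
  simp only [Spec_the_deal_of_the_day, the_deal_of_the_day, the_deal_of_the_day_alt, ht]
  rw [foldl_sum_reduce, combos_reduce_sum]
  by_cases hbig : ((k : Int) + 1) > ((deck.filter (fun c => decide (c > 0))).length : Int)
  · rw [if_pos hbig]
    have : (deck.filter (fun c => decide (c > 0))).length < k + 1 := by omega
    simp [pvEsym_eq_zero _ _ this]
  · rw [if_neg hbig, foldl_step_esym]
    have hp : ((k : Int) + 1) = ((k + 1 : Nat) : Int) := by push_cast; ring
    rw [hp, PySem.List.pyGet?_natCast]
    have hlt : k + 1 < k + 1 + 1 := by omega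
    simp [hlt]
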